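-- pv_equiv track=rewrite | github.com/tanganke/fusion_bench | fusion_bench/method/gossip/flan_t5_layer_wise_gossip.py | update_datasets
-- ===== SOURCE A (Python) =====
-- def update_datasets(datasets):
--     """
--     for evary epoch of local adamerging, we only use the data set corresponding to the model involved in the fusion
--     """
--     num_datasets = len(datasets)
--     datasets_copy = datasets.copy()
--     for i in range(num_datasets):
--         datasets[i] = (
--             datasets_copy[i]
--             .union(datasets_copy[(i + 1) % num_datasets])
--             .union(datasets_copy[(i - 1) % num_datasets])
--         )
--     return datasets
-- ===== SOURCE B (Python) =====
-- def update_datasets(datasets):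
--     """
--     for evary epoch of local adamerging, we only use the data set corresponding to the model involved in the fusion
--     """
--     n = len(datasets)
--     new = [s.copy() for s in datasets]
--     # scatter pass 1: push each source set into its left neighbor's slot
--     for j in range(n):
--         new[(j - 1) % n] = new[(j - 1) % n] | datasets[j]
--     # scatter pass 2: push each source set into its right neighbor's slot
--     for j in range(n):
--         new[(j + 1) % n] = new[(j + 1) % n] | datasets[j]
--     datasets[:] = new
--     return datasets
-- ===== Notes on version B (the rewrite author's own statement) =====
-- stated objective: alternative
-- what changed: Reverses the direction of aggregation: instead of each target pulling the union of its two cyclic neighbors in one gather loop, B starts from fresh copies and runs two staged scatter passes in which every source set is pushed into its left and then its right neighbor's slot, finally writing back with slice assignment.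
import Mathlib
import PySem

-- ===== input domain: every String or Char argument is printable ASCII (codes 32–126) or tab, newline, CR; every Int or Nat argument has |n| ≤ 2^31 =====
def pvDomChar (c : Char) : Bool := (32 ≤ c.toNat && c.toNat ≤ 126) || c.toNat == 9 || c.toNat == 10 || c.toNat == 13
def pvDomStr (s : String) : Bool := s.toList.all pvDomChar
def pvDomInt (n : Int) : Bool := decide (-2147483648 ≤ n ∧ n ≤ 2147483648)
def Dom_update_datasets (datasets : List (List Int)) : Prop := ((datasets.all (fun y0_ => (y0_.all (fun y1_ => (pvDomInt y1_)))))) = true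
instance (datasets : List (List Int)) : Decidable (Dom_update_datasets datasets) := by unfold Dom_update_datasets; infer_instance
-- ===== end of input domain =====

-- B reverses the aggregation direction: instead of A's gather loop (each slot i pulls
-- copy[i] ∪ copy[i+1] ∪ copy[i-1]), B makes fresh copies and runs two scatter passes,
-- pushing each source set into its left and then its right neighbor's slot (objective:
-- alternative, same cost); both Pythons mutate the argument list in place — the
-- equivalence proved here is about the return value only.

-- ===== PORT A =====
-- A: copy the list, then for i in range(n): datasets[i] = copy[i] ∪ copy[(i+1)%n] ∪ copy[(i-1)%n]
def update_datasets (datasets : List (List Int)) : List (List Int) :=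
  let num_datasets : Int := PySem.List.len datasets
  let datasets_copy := datasets
  (PySem.List.pyRange 0 num_datasets 1).foldl
    (fun ds i =>
      PySem.List.pySetD ds i
        (PySem.Set.union
          (PySem.Set.union
            (PySem.List.pyGetD datasets_copy i [])
            (PySem.List.pyGetD datasets_copy (PySem.Int.mod (i + 1) num_datasets) []))
          (PySem.List.pyGetD datasets_copy (PySem.Int.mod (i - 1) num_datasets) [])))
    datasets

-- ===== PORT B =====
-- B: new = fresh copies; pass 1 pushes datasets[j] into slot (j-1)%n, pass 2 into slot (j+1)%n
def update_datasets_alt (datasets : List (List Int)) : List (List Int) :=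
  let n : Int := PySem.List.len datasets
  let new0 := datasets.map (fun s => s)          -- [s.copy() for s in datasets]
  let new1 := (PySem.List.pyRange 0 n 1).foldl
    (fun ds j =>
      PySem.List.pySetD ds (PySem.Int.mod (j - 1) n)
        (PySem.Set.union (PySem.List.pyGetD ds (PySem.Int.mod (j - 1) n) [])
          (PySem.List.pyGetD datasets j []))) new0
  let new2 := (PySem.List.pyRange 0 n 1).foldl
    (fun ds j =>
      PySem.List.pySetD ds (PySem.Int.mod (j + 1) n)
        (PySem.Set.union (PySem.List.pyGetD ds (PySem.Int.mod (j + 1) n) [])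
          (PySem.List.pyGetD datasets j []))) new1
  new2

-- ===== PRECONDITION & SPEC =====
def Spec_update_datasets (datasets : List (List Int)) (out : List (List Int)) : Prop := out = update_datasets_alt datasets
instance (datasets : List (List Int)) (out : List (List Int)) : Decidable (Spec_update_datasets datasets out) := by unfold Spec_update_datasets; infer_instance

-- ===== CLAIM (what is proved, stated in full; the proofs are below) =====
def Claim_equal_update_datasets : Prop := ∀ (datasets : List (List Int)), Dom_update_datasets datasets → Spec_update_datasets datasets (update_datasets datasets)

-- ===== LEMMAS AND PROOFS =====

-- the value A writes into slot k
def pvG (δ : List (List Int)) (k : Nat) : List Int :=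
  PySem.Set.union
    (PySem.Set.union
      (PySem.List.pyGetD δ (k : Int) [])
      (PySem.List.pyGetD δ (PySem.Int.mod ((k : Int) + 1) (δ.length : Int)) []))
    (PySem.List.pyGetD δ (PySem.Int.mod ((k : Int) - 1) (δ.length : Int)) [])

-- one scatter write: read the target slot, combine, write it back
def pvStep {α : Type} (d : α) (σ : Nat → Nat) (v : Nat → α → α) (ds : List α) (j : Nat) : List α :=
  ds.set (σ j) (v j (ds.getD (σ j) d))

lemma pvStep_len {α : Type} (d : α) (σ : Nat → Nat) (v : Nat → α → α) :
    ∀ (js : List Nat) (ds : List α), (js.foldl (pvStep d σ v) ds).length = ds.length := by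
  intro js
  induction js with
  | nil => intro ds; rfl
  | cons j rest ih => intro ds; rw [List.foldl_cons, ih]; simp [pvStep]

lemma pvStep_untouched {α : Type} (d : α) (σ : Nat → Nat) (v : Nat → α → α) (k : Nat) :
    ∀ (js : List Nat) (ds : List α), (∀ j ∈ js, σ j ≠ k) →
      (js.foldl (pvStep d σ v) ds)[k]? = ds[k]? := by
  intro js
  induction js with
  | nil => intro ds _; rfl
  | cons j rest ih =>
    intro ds h
    rw [List.foldl_cons, ih _ (fun j' hj' => h j' (List.mem_cons_of_mem _ hj'))]
    exact List.getElem?_set_ne (h j (List.mem_cons_self) )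

lemma pvStep_slot {α : Type} (d : α) (σ : Nat → Nat) (v : Nat → α → α) (k j0 : Nat)
    (js₁ js₂ : List Nat) (ds : List α)
    (h₁ : ∀ j ∈ js₁, σ j ≠ k) (h₂ : ∀ j ∈ js₂, σ j ≠ k) (hσ : σ j0 = k) (hk : k < ds.length) :
    ((js₁ ++ j0 :: js₂).foldl (pvStep d σ v) ds)[k]? = some (v j0 (ds.getD k d)) := by
  rw [List.foldl_append, List.foldl_cons]
  set ds1 := js₁.foldl (pvStep d σ v) ds with hds1
  have hlen : ds1.length = ds.length := pvStep_len d σ v js₁ ds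
  have hsame : ds1[k]? = ds[k]? := pvStep_untouched d σ v k js₁ ds h₁
  have hgd : ds1.getD k d = ds.getD k d := by
    rw [List.getD_eq_getElem?_getD, List.getD_eq_getElem?_getD, hsame]
  rw [pvStep_untouched d σ v k js₂ _ h₂]
  unfold pvStep
  rw [hσ, hgd]
  exact List.getElem?_set_self (by omega)

-- j ↦ (j + c) % n is injective on [0, n) for c ≤ n
lemma pvShift_inj (n c j j' : Nat) (hc : c ≤ n) (hj : j < n) (hj' : j' < n)
    (h : (j + c) % n = (j' + c) % n) : j = j' := by
  have e1 : (j + c) % n = if j + c < n then j + c else j + c - n := by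
    split_ifs with h1
    · exact Nat.mod_eq_of_lt h1
    · rw [Nat.mod_eq_sub_mod (by omega), Nat.mod_eq_of_lt (by omega)]
  have e2 : (j' + c) % n = if j' + c < n then j' + c else j' + c - n := by
    split_ifs with h1
    · exact Nat.mod_eq_of_lt h1
    · rw [Nat.mod_eq_sub_mod (by omega), Nat.mod_eq_of_lt (by omega)]
  rw [e1, e2] at h
  split_ifs at h <;> omega

-- per-slot value of a full scatter pass over range n with shift c
lemma pvScatter_getElem {α : Type} (d : α) (c : Nat) (v : Nat → α → α) (ds : List α)
    (n k : Nat) (hn : n = ds.length) (hk : k < n) (hc : c ≤ n) :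
    ((List.range n).foldl (pvStep d (fun j => (j + c) % n) v) ds)[k]?
      = some (v ((k + (n - c)) % n) (ds.getD k d)) := by
  set j0 := (k + (n - c)) % n with hj0def
  have hj0lt : j0 < n := Nat.mod_lt _ (by omega)
  have hσj0 : (j0 + c) % n = k := by
    rw [hj0def, Nat.mod_add_mod, show k + (n - c) + c = k + n from by omega,
      Nat.add_mod_right, Nat.mod_eq_of_lt hk]
  obtain ⟨s, t, hst⟩ := List.append_of_mem (List.mem_range.mpr hj0lt)
  have hnd : (s ++ j0 :: t).Nodup := by rw [← hst]; exact List.nodup_range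
  have hj0s : j0 ∉ s := fun hmem => (List.disjoint_of_nodup_append hnd) hmem List.mem_cons_self
  have hj0t : j0 ∉ t := by
    have := (List.nodup_append.mp hnd).2.1
    exact (List.nodup_cons.mp this).1
  have hne : ∀ j, j ∈ s ∨ j ∈ t → (j + c) % n ≠ k := by
    rintro j hj hjk
    have hjr : j ∈ List.range n := by
      rw [hst]
      rcases hj with h | h
      · exact List.mem_append_left _ h
      · exact List.mem_append_right _ (List.mem_cons_of_mem _ h)
    have hjlt : j < n := List.mem_range.mp hjr
    have : j = j0 := pvShift_inj n c j j0 hc hjlt hj0lt (by rw [hjk, hσj0])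
    rcases hj with h | h
    · exact hj0s (this ▸ h)
    · exact hj0t (this ▸ h)
  rw [hst]
  exact pvStep_slot d _ v k j0 s t ds (fun j hj => hne j (Or.inl hj))
    (fun j hj => hne j (Or.inr hj)) hσj0 (by omega)

-- (kept from the mod computations) PySem.Int.mod (k+1) n and (k-1) n as Nat mods
lemma pvMod_succ (k n : Nat) (_hn : 0 < n) :
    PySem.Int.mod ((k : Int) + 1) (n : Int) = (((k + 1) % n : Nat) : Int) := by
  have := PySem.Int.mod_natCast (k + 1) n
  simpa using this

lemma pvMod_pred (k n : Nat) (hn : 0 < n) :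
    PySem.Int.mod ((k : Int) - 1) (n : Int) = (((k + (n - 1)) % n : Nat) : Int) := by
  have hb : (0 : Int) < (n : Int) := by exact_mod_cast hn
  have hcast : ((k + (n - 1) : Nat) : Int) = ((k : Int) - 1) + (n : Int) := by
    push_cast [hn]; ring
  rw [PySem.Int.mod_eq_emod_of_pos hb]
  calc ((k : Int) - 1) % (n : Int)
      = (((k : Int) - 1) + (n : Int)) % (n : Int) := (Int.add_emod_right _ _).symm
    _ = (((k + (n - 1)) % n : Nat) : Int) := by rw [← hcast]; push_cast; ring

-- writing each element into its slot, left to right, yields the list of the written values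
lemma foldl_set_range {α : Type} (f : Nat → α) :
    ∀ (n : Nat) (l : List α), n ≤ l.length →
      (List.range n).foldl (fun ds i => ds.set i (f i)) l
        = (List.range n).map f ++ l.drop n := by
  intro n
  induction n with
  | zero => intro l _; simp
  | succ m ih =>
    intro l hl
    rw [List.range_succ, List.foldl_append, ih l (by omega)]
    have hlen : ((List.range m).map f).length = m := by simp
    have hdrop : l.drop m = l[m] :: l.drop (m + 1) :=
      List.drop_eq_getElem_cons (by omega)
    have hkey : (l.drop m).set 0 (f m) = f m :: l.drop (m + 1) := by
      rw [hdrop]; rfl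
    simp only [List.foldl_cons, List.foldl_nil, List.set_append, hlen,
      Nat.lt_irrefl, if_false, Nat.sub_self, hkey, List.map_append,
      List.map_cons, List.map_nil, List.append_assoc, List.cons_append, List.nil_append]

lemma update_datasets_eq_map (δ : List (List Int)) :
    update_datasets δ = (List.range δ.length).map (pvG δ) := by
  unfold update_datasets
  dsimp only
  simp only [PySem.List.len_eq]
  rw [PySem.List.pyRange_zero_natCast, List.foldl_map]
  simp only [PySem.List.pySetD_natCast]
  rw [show (fun (ds : List (List Int)) (k : Nat) =>
        ds.set k (PySem.Set.union
          (PySem.Set.union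
            (PySem.List.pyGetD δ (k : Int) [])
            (PySem.List.pyGetD δ (PySem.Int.mod ((k : Int) + 1) (δ.length : Int)) []))
          (PySem.List.pyGetD δ (PySem.Int.mod ((k : Int) - 1) (δ.length : Int)) [])))
      = (fun ds k => ds.set k (pvG δ k)) from rfl]
  rw [foldl_set_range (pvG δ) δ.length δ le_rfl]
  simp

-- A's per-slot value, resolved to Nat indexing (for k < n)
lemma pvG_eq (δ : List (List Int)) (k : Nat) (hk : k < δ.length) :
    pvG δ k = PySem.Set.union
        (PySem.Set.union (δ.getD k []) (δ.getD ((k + 1) % δ.length) []))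
        (δ.getD ((k + (δ.length - 1)) % δ.length) []) := by
  have hn : 0 < δ.length := by omega
  unfold pvG
  rw [pvMod_succ k δ.length hn, pvMod_pred k δ.length hn]
  simp only [PySem.List.pyGetD_natCast]

lemma update_datasets_alt_eq_map (δ : List (List Int)) :
    update_datasets_alt δ = (List.range δ.length).map (pvG δ) := by
  unfold update_datasets_alt
  dsimp only
  rcases Nat.eq_zero_or_pos δ.length with h0 | hpos
  · simp [List.eq_nil_of_length_eq_zero h0]
  set n := δ.length with hn
  have hmap : δ.map (fun s => s) = δ := by simp
  simp only [PySem.List.len_eq, hmap]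
  rw [PySem.List.pyRange_zero_natCast, List.foldl_map, List.foldl_map]
  -- rewrite pass 1 as a pvStep fold with shift c = n - 1
  have hpass1 : ∀ (l : List (List Int)),
      (List.range n).foldl
        (fun ds (j : Nat) =>
          PySem.List.pySetD ds (PySem.Int.mod ((j : Int) - 1) (n : Int))
            (PySem.Set.union (PySem.List.pyGetD ds (PySem.Int.mod ((j : Int) - 1) (n : Int)) [])
              (PySem.List.pyGetD δ (j : Int) []))) l
      = (List.range n).foldl
          (pvStep [] (fun j => (j + (n - 1)) % n) (fun j x => PySem.Set.union x (δ.getD j []))) l := by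
    intro l
    refine PySem.List.foldl_congr_mem _ _ _ _ (fun ds j hj => ?_)
    rw [pvMod_pred j n hpos]
    simp only [PySem.List.pySetD_natCast, PySem.List.pyGetD_natCast]
    rfl
  have hpass2 : ∀ (l : List (List Int)),
      (List.range n).foldl
        (fun ds (j : Nat) =>
          PySem.List.pySetD ds (PySem.Int.mod ((j : Int) + 1) (n : Int))
            (PySem.Set.union (PySem.List.pyGetD ds (PySem.Int.mod ((j : Int) + 1) (n : Int)) [])
              (PySem.List.pyGetD δ (j : Int) []))) l
      = (List.range n).foldl
          (pvStep [] (fun j => (j + 1) % n) (fun j x => PySem.Set.union x (δ.getD j []))) l := by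
    intro l
    refine PySem.List.foldl_congr_mem _ _ _ _ (fun ds j hj => ?_)
    rw [pvMod_succ j n hpos]
    simp only [PySem.List.pySetD_natCast, PySem.List.pyGetD_natCast]
    rfl
  rw [hpass1, hpass2]
  set v : Nat → List Int → List Int := fun j x => PySem.Set.union x (δ.getD j []) with hv
  set S1 := (List.range n).foldl (pvStep [] (fun j => (j + (n - 1)) % n) v) δ with hS1
  have hS1len : S1.length = n := by rw [hS1, pvStep_len]
  have hS1k : ∀ k, k < n → S1[k]? = some (v ((k + 1) % n) (δ.getD k [])) := by
    intro k hk
    have h1 := pvScatter_getElem [] (n - 1) v δ n k hn hk (by omega)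
    rw [show n - (n - 1) = 1 from by omega] at h1
    rw [← hS1] at h1
    exact h1
  have hS2len : ((List.range n).foldl (pvStep [] (fun j => (j + 1) % n) v) S1).length = n := by
    rw [pvStep_len, hS1len]
  refine List.ext_getElem? fun k => ?_
  by_cases hk : k < n
  · have h2 := pvScatter_getElem [] 1 v S1 n k hS1len.symm hk (by omega)
    have hS1gd : S1.getD k [] = v ((k + 1) % n) (δ.getD k []) := by
      rw [List.getD_eq_getElem?_getD, hS1k k hk]; rfl
    rw [h2, hS1gd]
    simp only [List.getElem?_map, List.getElem?_range hk, Option.map_some, pvG_eq δ k hk, hv]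
    rw [← hn]
  · have h1 : ((List.range n).foldl (pvStep [] (fun j => (j + 1) % n) v) S1)[k]? = none :=
      List.getElem?_eq_none (by omega)
    have h2 : (((List.range n).map (pvG δ))[k]? : Option (List Int)) = none :=
      List.getElem?_eq_none (by simp; omega)
    rw [h1, h2]

-- ===== VERDICT (by name: the statement is the Claim_ definition above) =====
theorem update_datasets_spec : Claim_equal_update_datasets := by
  intro δ _
  unfold Spec_update_datasets
  rw [update_datasets_eq_map, update_datasets_alt_eq_map]
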